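-- pv_equiv track=rewrite | github.com/johnforgit/leetcode | Leetcode3839. Number of prefix connected groups/Solution.py | prefixConnected
-- ===== SOURCE A (Python) =====
-- from typing import List
--
-- def prefixConnected(words: List[str], k: int) -> int:
--     d = {}
--     for word in words:
--         if len(word) >= k:
--             d[word[:k]] = d.get(word[:k], 0) + 1
--
--     ans = 0
--     for v in d.values():
--         if v > 1:
--             ans += 1
--     return ans
-- ===== SOURCE B (Python) =====
-- def prefixConnected(words, k):
--     # Sort the k-prefixes of the sufficiently long words, then count maximal
--     # runs of equal adjacent prefixes whose length exceeds 1 (no hash counting).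
--     ps = sorted(w[:k] for w in words if len(w) >= k)
--     n = len(ps)
--     ans = 0
--     i = 0
--     while i < n:
--         j = i + 1
--         while j < n and ps[j] == ps[i]:
--             j += 1
--         if j - i > 1:
--             ans += 1
--         i = j
--     return ans
-- ===== Notes on version B (the rewrite author's own statement) =====
-- stated objective: alternative
-- what changed: Replaces the hash-count dict plus values-filter pass by sorting the k-prefixes and counting maximal runs of equal adjacent elements whose length exceeds 1.
import Mathlib
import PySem

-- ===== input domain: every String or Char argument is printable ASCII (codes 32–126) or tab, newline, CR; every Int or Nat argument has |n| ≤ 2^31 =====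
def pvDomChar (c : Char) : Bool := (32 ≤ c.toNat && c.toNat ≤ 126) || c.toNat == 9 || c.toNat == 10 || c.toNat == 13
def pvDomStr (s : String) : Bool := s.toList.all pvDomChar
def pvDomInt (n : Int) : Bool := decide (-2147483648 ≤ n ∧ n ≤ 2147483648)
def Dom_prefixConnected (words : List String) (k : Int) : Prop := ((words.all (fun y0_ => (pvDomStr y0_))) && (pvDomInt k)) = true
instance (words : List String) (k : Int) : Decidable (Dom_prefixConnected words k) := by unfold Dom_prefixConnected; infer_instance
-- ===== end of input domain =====

-- B replaces A's count-dict + values-filter second pass by sorting the k-prefixes and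
-- counting maximal runs of equal adjacent elements of length > 1 (objective: alternative).


-- ===== PORT A =====
def prefixConnected (words : List String) (k : Int) : Int :=
  let d : PySem.Dict String Int :=
    words.foldl (fun d word =>
      if k ≤ PySem.Str.len word then
        d.insert (PySem.Str.slice word none (some k))
          (d.getD (PySem.Str.slice word none (some k)) 0 + 1)
      else d) PySem.Dict.empty
  d.values.foldl (fun ans v => if 1 < v then ans + 1 else ans) 0

-- ===== PORT B =====
-- the inner while loop of Source B: it advances past the maximal run of the current
-- prefix; here the run is split off with takeWhile/dropWhile, and the outer while
-- loop is the structural recursion on what remains after the run.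
def pvRunCount : List String → Int
  | [] => 0
  | p :: t =>
    (if 1 < 1 + (t.takeWhile (fun q => q == p)).length then (1:Int) else 0)
      + pvRunCount (t.dropWhile (fun q => q == p))
termination_by l => l.length
decreasing_by
  simp only [List.length_cons]
  exact Nat.lt_succ_of_le (List.length_dropWhile_le _ _)

def prefixConnected_alt (words : List String) (k : Int) : Int :=
  pvRunCount (PySem.List.sorted
    ((words.filter (fun w => k ≤ PySem.Str.len w)).map
      (fun w => PySem.Str.slice w none (some k))) (fun x => x) false)

-- ===== PRECONDITION & SPEC =====
def Spec_prefixConnected (words : List String) (k : Int) (out : Int) : Prop := out = prefixConnected_alt words k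
instance (words : List String) (k : Int) (out : Int) : Decidable (Spec_prefixConnected words k out) := by unfold Spec_prefixConnected; infer_instance

-- ===== CLAIM (what is proved, stated in full; the proofs are below) =====
def Claim_equal_prefixConnected : Prop := ∀ (words : List String) (k : Int), Dom_prefixConnected words k → Spec_prefixConnected words k (prefixConnected words k)

-- ===== LEMMAS AND PROOFS =====

-- A's value as a count over the distinct admitted prefixes.
lemma pvA_spec (words : List String) (k : Int) :
    prefixConnected words k =
      (((PySem.Set.ofList ((words.filter (fun w => decide (k ≤ PySem.Str.len w))).map
          (fun w => PySem.Str.slice w none (some k)))).filter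
        (fun x => decide (1 < (((words.filter (fun w => decide (k ≤ PySem.Str.len w))).map
          (fun w => PySem.Str.slice w none (some k))).count x : Int)))).length : Int) := by
  unfold prefixConnected
  rw [PySem.List.foldl_ite_eq_foldl_filter (p := fun w => k ≤ PySem.Str.len w)
    (f := fun d w => PySem.Dict.insert d (PySem.Str.slice w none (some k))
      (PySem.Dict.getD d (PySem.Str.slice w none (some k)) 0 + 1))]
  rw [← List.foldl_map (f := fun w => PySem.Str.slice w none (some k))
    (g := fun d p => PySem.Dict.insert d p (PySem.Dict.getD d p 0 + 1))]
  rw [PySem.Dict.foldl_insert_getD_add_one_eq_counter]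
  rw [PySem.List.foldl_ite_add_one (p := fun v => (1:Int) < v)]
  have hv : (PySem.Dict.counter ((words.filter (fun w => decide (k ≤ PySem.Str.len w))).map
      (fun w => PySem.Str.slice w none (some k)))).values =
      (PySem.Set.ofList ((words.filter (fun w => decide (k ≤ PySem.Str.len w))).map
        (fun w => PySem.Str.slice w none (some k)))).map
        (fun x => (((words.filter (fun w => decide (k ≤ PySem.Str.len w))).map
          (fun w => PySem.Str.slice w none (some k))).count x : Int)) := by
    rw [PySem.Dict.values, PySem.Dict.items_counter, List.map_map]
    simp only [Function.comp_def]
  rw [hv, List.countP_map, ← List.countP_eq_length_filter, zero_add]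
  simp only [Function.comp_def]

-- the head element of a sorted list never reappears after its run is dropped
lemma pv_not_mem_dropWhile (t : List String) (p : String)
    (hpw : t.Pairwise (· ≤ ·)) (hle : ∀ x ∈ t, p ≤ x) :
    p ∉ t.dropWhile (fun q => q == p) := by
  induction t with
  | nil => simp
  | cons q t' ih =>
    by_cases hq : q = p
    · subst hq
      rw [List.dropWhile_cons_of_pos (by simp)]
      exact ih hpw.of_cons (fun x hx => hle x (List.mem_cons_of_mem _ hx))
    · rw [List.dropWhile_cons_of_neg (by simpa using hq)]
      intro hmem
      rcases List.mem_cons.mp hmem with h | h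
      · exact hq h.symm
      · have h1 : q ≤ p := (List.pairwise_cons.mp hpw).1 p h
        have h2 : p ≤ q := hle q List.mem_cons_self
        exact hq (le_antisymm h1 h2)

-- run counting on a sorted list counts the distinct elements of multiplicity > 1
lemma pvRunCount_spec : ∀ (n : ℕ) (l : List String), l.length ≤ n → l.Pairwise (· ≤ ·) →
    pvRunCount l =
      (((PySem.Set.ofList l).filter (fun x => decide (1 < (l.count x : Int)))).length : Int) := by
  intro n
  induction n with
  | zero =>
    intro l hl _
    have : l = [] := List.eq_nil_of_length_eq_zero (Nat.le_zero.mp hl)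
    subst this
    simp [pvRunCount, PySem.Set.ofList]
  | succ n ih =>
    intro l hl hpw
    match l with
    | [] => simp [pvRunCount, PySem.Set.ofList]
    | p :: t =>
      set a := t.takeWhile (fun q => q == p) with ha
      set b := t.dropWhile (fun q => q == p) with hb
      have htab : a ++ b = t := List.takeWhile_append_dropWhile
      have hasz : ∀ x ∈ a, x = p := fun x hx => by
        simpa using List.mem_takeWhile_imp hx
      have hle : ∀ x ∈ t, p ≤ x := (List.pairwise_cons.mp hpw).1
      have hpb : p ∉ b := pv_not_mem_dropWhile t p hpw.of_cons hle
      have hbpw : b.Pairwise (· ≤ ·) :=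
        hpw.of_cons.sublist (hb ▸ List.dropWhile_sublist _)
      have hblen : b.length ≤ n := by
        have h1 : b.length ≤ t.length := hb ▸ List.length_dropWhile_le _ _
        have h2 : t.length + 1 ≤ n + 1 := by simpa using hl
        omega
      -- counts in l = p :: t, with t = a ++ b
      have hcount_p : (p :: t).count p = 1 + a.length := by
        rw [← htab]
        have hab : a.count p = a.length := by
          rw [List.count_eq_length]
          intro x hx
          simpa using (hasz x hx).symm
        have hbp : b.count p = 0 := List.count_eq_zero.mpr hpb
        simp [List.count_append, hab, hbp]
        omega
      have hcount_ne : ∀ x, x ≠ p → (p :: t).count x = b.count x := by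
        intro x hx
        rw [← htab]
        have hax : a.count x = 0 := List.count_eq_zero.mpr (fun hm => hx (hasz x hm))
        have hpx : p ≠ x := Ne.symm hx
        simp [List.count_append, hax, hpx]
      -- the distinct elements of l are p plus the distinct elements of b
      have hperm : (PySem.Set.ofList (p :: t)).Perm (p :: PySem.Set.ofList b) := by
        rw [List.perm_ext_iff_of_nodup (PySem.Set.nodup_ofList _)
          (List.nodup_cons.mpr ⟨by rw [PySem.Set.mem_ofList]; exact hpb,
            PySem.Set.nodup_ofList _⟩)]
        intro x
        rw [PySem.Set.mem_ofList, List.mem_cons, List.mem_cons, PySem.Set.mem_ofList, ← htab,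
          List.mem_append]
        constructor
        · rintro (h | h | h)
          · exact Or.inl h
          · exact Or.inl (hasz x h)
          · exact Or.inr h
        · rintro (h | h)
          · exact Or.inl h
          · exact Or.inr (Or.inr h)
      have hlen : ((PySem.Set.ofList (p :: t)).filter
            (fun x => decide (1 < (((p :: t).count x : Nat) : Int)))).length =
          ((p :: PySem.Set.ofList b).filter
            (fun x => decide (1 < (((p :: t).count x : Nat) : Int)))).length :=
        (hperm.filter _).length_eq
      rw [show pvRunCount (p :: t) =
          (if 1 < 1 + a.length then (1:Int) else 0) + pvRunCount b from by
        rw [pvRunCount]]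
      rw [ih b hblen hbpw, hlen, List.filter_cons]
      have hfb : (PySem.Set.ofList b).filter
            (fun x => decide (1 < (((p :: t).count x : Nat) : Int))) =
          (PySem.Set.ofList b).filter
            (fun x => decide (1 < ((b.count x : Nat) : Int))) := by
        apply List.filter_congr
        intro x hx
        have hxp : x ≠ p := fun h => hpb (h ▸ (PySem.Set.mem_ofList _ _).mp hx)
        rw [hcount_ne x hxp]
      rw [hfb]
      by_cases hrun : 1 < 1 + a.length
      · have : decide (1 < (((p :: t).count p : Nat) : Int)) = true := by
          rw [hcount_p]; simp only [decide_eq_true_eq]; push_cast; omega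
        rw [if_pos hrun, this, if_pos rfl, List.length_cons]
        push_cast
        ring
      · have : decide (1 < (((p :: t).count p : Nat) : Int)) = false := by
          rw [hcount_p]; simp only [decide_eq_false_iff_not]; push_cast; omega
        rw [if_neg hrun, this, if_neg (by simp)]
        simp

-- ===== VERDICT (by name: the statement is the Claim_ definition above) =====
theorem prefixConnected_spec : Claim_equal_prefixConnected := by
  intro words k _
  unfold Spec_prefixConnected prefixConnected_alt
  rw [pvA_spec]
  set ps := (words.filter (fun w => decide (k ≤ PySem.Str.len w))).map
    (fun w => PySem.Str.slice w none (some k)) with hps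
  set s := PySem.List.sorted ps (fun x => x) false with hs
  have hperm : s.Perm ps := PySem.List.sorted_perm ..
  have hpw : s.Pairwise (· ≤ ·) := by
    simpa using PySem.List.sorted_pairwise (xs := ps) (key := fun x => x)
  rw [pvRunCount_spec s.length s le_rfl hpw]
  congr 1
  have hfc : s.filter (fun x => decide (1 < ((s.count x : Nat) : Int))) =
      s.filter (fun x => decide (1 < ((ps.count x : Nat) : Int))) := by
    exact List.filter_congr (fun x _ => by rw [hperm.count_eq])
  have hperm2 : (PySem.Set.ofList ps).Perm (PySem.Set.ofList s) := by
    rw [List.perm_ext_iff_of_nodup (PySem.Set.nodup_ofList _) (PySem.Set.nodup_ofList _)]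
    intro x
    rw [PySem.Set.mem_ofList, PySem.Set.mem_ofList, hperm.mem_iff]
  calc ((PySem.Set.ofList ps).filter
        (fun x => decide (1 < ((ps.count x : Nat) : Int)))).length
      = ((PySem.Set.ofList s).filter
        (fun x => decide (1 < ((ps.count x : Nat) : Int)))).length := (hperm2.filter _).length_eq
    _ = ((PySem.Set.ofList s).filter
        (fun x => decide (1 < ((s.count x : Nat) : Int)))).length := by
        exact congrArg List.length (List.filter_congr (fun x _ => by rw [hperm.count_eq]))
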